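-- pv_equiv track=rewrite | github.com/Arkadiy-Garber/PLOS-Biology-Review-code | ArkTools.py | trypsin
-- ===== SOURCE A (Python) =====
-- def trypsin(seq):
--     peptide = ''
--     peptideLS = []
--     for j in seq:
--         if j in ["R", "L"]:
--             peptide += j
--             peptideLS.append(peptide)
--             peptide = ""
--         else:
--             peptide += j
--     peptideLS.append(peptide)
--     return peptideLS
-- ===== SOURCE B (Python) =====
-- def trypsin(seq):
--     # Build the peptide list back-to-front over the reversed sequence:
--     # an R/L starts a new (leading) peptide, any other residue is prepended
--     # to the current first peptide. No flush step needed.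
--     parts = ['']
--     for j in reversed(seq):
--         if j in 'RL':
--             parts.insert(0, j)
--         else:
--             parts[0] = j + parts[0]
--     return parts
-- ===== Notes on version B (the rewrite author's own statement) =====
-- stated objective: alternative
-- what changed: Replaced the forward accumulate-and-flush loop (mutable current-peptide buffer, final append) with a back-to-front construction over the reversed sequence: each R/L starts a new leading peptide, other characters are prepended to the head, so no buffer and no flush step exist.
import Mathlib
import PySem

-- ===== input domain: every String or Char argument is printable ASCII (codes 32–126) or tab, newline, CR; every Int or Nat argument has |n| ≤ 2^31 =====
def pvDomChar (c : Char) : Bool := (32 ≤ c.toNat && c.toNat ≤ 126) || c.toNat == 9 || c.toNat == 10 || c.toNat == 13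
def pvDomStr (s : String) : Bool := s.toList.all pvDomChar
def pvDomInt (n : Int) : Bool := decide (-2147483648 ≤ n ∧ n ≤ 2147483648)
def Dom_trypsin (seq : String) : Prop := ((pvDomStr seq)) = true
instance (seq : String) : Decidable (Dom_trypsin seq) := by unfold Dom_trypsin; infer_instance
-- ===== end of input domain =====

-- B replaces A's forward accumulate-and-flush loop by a back-to-front build over the
-- reversed sequence (alternative decomposition, same O(n) cost; return value only, no mutation).

-- ===== PORT A =====
-- A's loop: state (peptide, peptideLS); R/L flushes peptide+j and resets, else extends peptide;
-- after the loop the remaining peptide is appended. Strings carried as List Char, String.mk at the end.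
def trypsinGo (acc : List (List Char)) (pep : List Char) : List Char → List (List Char)
  | [] => acc ++ [pep]
  | c :: rest =>
    if c = 'R' ∨ c = 'L' then trypsinGo (acc ++ [pep ++ [c]]) [] rest
    else trypsinGo acc (pep ++ [c]) rest

def trypsin (seq : String) : List String :=
  (trypsinGo [] [] seq.toList).map String.mk

-- ===== PORT B =====
-- B's reversed loop = structural recursion from the right: R/L starts a new leading peptide,
-- any other character is prepended to the head peptide.
def trypsinAltGo : List Char → List (List Char)
  | [] => [[]]
  | c :: rest =>
    if c = 'R' ∨ c = 'L' then [c] :: trypsinAltGo rest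
    else
      match trypsinAltGo rest with
      | [] => [[c]]   -- unreachable: trypsinAltGo never returns []
      | h :: t => (c :: h) :: t

def trypsin_alt (seq : String) : List String :=
  (trypsinAltGo seq.toList).map String.mk

-- ===== PRECONDITION & SPEC =====
def Spec_trypsin (seq : String) (out : List String) : Prop := out = trypsin_alt seq
instance (seq : String) (out : List String) : Decidable (Spec_trypsin seq out) := by unfold Spec_trypsin; infer_instance

-- ===== CLAIM (what is proved, stated in full; the proofs are below) =====
def Claim_equal_trypsin : Prop := ∀ (seq : String), Dom_trypsin seq → Spec_trypsin seq (trypsin seq)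

-- ===== LEMMAS AND PROOFS =====
theorem trypsinAltGo_ne_nil (l : List Char) : trypsinAltGo l ≠ [] := by
  cases l with
  | nil => simp [trypsinAltGo]
  | cons c rest =>
    simp only [trypsinAltGo]
    split
    · simp
    · cases h : trypsinAltGo rest <;> simp

-- the loop invariant: A's recursion equals acc ++ (pep prepended to the head of B's result)
theorem trypsinGo_eq (l : List Char) : ∀ (acc : List (List Char)) (pep : List Char),
    trypsinGo acc pep l =
      acc ++ (match trypsinAltGo l with
              | [] => [pep]
              | h :: t => (pep ++ h) :: t) := by
  induction l with
  | nil => intro acc pep; simp [trypsinGo, trypsinAltGo]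
  | cons c rest ih =>
    intro acc pep
    simp only [trypsinGo, trypsinAltGo]
    by_cases hc : c = 'R' ∨ c = 'L'
    · simp only [if_pos hc, ih]
      cases h : trypsinAltGo rest with
      | nil => exact absurd h (trypsinAltGo_ne_nil rest)
      | cons h' t' => simp
    · simp only [if_neg hc, ih]
      cases h : trypsinAltGo rest with
      | nil => exact absurd h (trypsinAltGo_ne_nil rest)
      | cons h' t' => simp

-- ===== VERDICT (by name: the statement is the Claim_ definition above) =====
theorem trypsin_spec : Claim_equal_trypsin := by
  intro seq _
  unfold Spec_trypsin trypsin trypsin_alt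
  rw [trypsinGo_eq]
  cases h : trypsinAltGo seq.toList with
  | nil => exact absurd h (trypsinAltGo_ne_nil seq.toList)
  | cons h' t' => simp
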